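-- pv_equiv track=rewrite | github.com/d9d-project/d9d | d9d/pipelining/infra/schedule/component/program/topology.py | build_stage_to_host_rank_topology
-- ===== SOURCE A (Python) =====
-- from enum import StrEnum
--
-- class ScheduleStyle(StrEnum):
--     """
--     Defines the strategy for mapping logical stages to physical ranks.
--
--     Attributes:
--         loop: Assigns stages in a round-robin circular fashion (mod pp_size).
--         v: Assigns stages in a zig-zag V-shape pattern. Useful for interleaved 1F1B schedules.
--     """
--
--     loop = "loop"
--     v = "v"
--
-- def build_stage_to_host_rank_topology(pp_size: int, num_stages: int, style: ScheduleStyle) -> dict[int, int]: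
--     """
--     Constructs the mapping from stage index to rank index.
--
--     Args:
--         pp_size: Number of pipeline parallel ranks.
--         num_stages: Total number of model stages.
--         style: The topology style to use for assignment.
--
--     Returns:
--         A dictionary mapping stage IDs to Rank IDs.
--
--     Raises:
--         ValueError: If the style is unknown or if V-style parameters are invalid
--             (num_stages must be divisible by pp_size).
--     """
--
--     match style:
--         case ScheduleStyle.loop:
--             return {stage_index: stage_index % pp_size for stage_index in range(num_stages)}
--         case ScheduleStyle.v:
--             if num_stages % pp_size != 0:
--                 raise ValueError(
--                     f"num_stages {num_stages} must be evenly divisible by pp_size {pp_size} for V schedules"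
--                 )
--
--             result = {}
--             rank_index = 0
--             for stage_index in range(num_stages):
--                 result[stage_index] = rank_index
--                 if (stage_index + 1) % pp_size == 0:
--                     continue
--                 if (stage_index // pp_size) % 2 == 0:
--                     rank_index += 1
--                 else:
--                     rank_index -= 1
--             return result
--         case _:
--             raise ValueError()
-- ===== SOURCE B (Python) =====
-- def build_stage_to_host_rank_topology(pp_size, num_stages, style):
--     if style == "loop":
--         pairs = []
--         for s in range(num_stages):
--             pairs.append((s, s % pp_size))
--         return dict(pairs)
--     if style == "v":
--         if num_stages % pp_size != 0:
--             raise ValueError(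
--                 f"num_stages {num_stages} must be evenly divisible by pp_size {pp_size} for V schedules"
--             )
--         up = list(range(pp_size))
--         down = up[::-1]
--         ranks = []
--         for block in range(num_stages // pp_size):
--             ranks += up if block % 2 == 0 else down
--         return dict(enumerate(ranks))
--     raise ValueError()
-- ===== Notes on version B (the rewrite author's own statement) =====
-- stated objective: alternative
-- what changed: The v-style stateful up/down rank accumulator walking stage by stage is replaced by a block construction: precompute the ascending rank row and its reversal, concatenate one row per block (reversed for odd blocks), and enumerate the resulting rank list; the loop branch builds an explicit pair list and converts it to a dict instead of a dict comprehension.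
-- outside the precondition, e.g. on build_stage_to_host_rank_topology(-2, 4, 'v'): A returns {0: 0, 1: 1, 2: 1, 3: 0}, B returns {}; on build_stage_to_host_rank_topology(0, 3, 'loop'): A raises ZeroDivisionError, B raises ZeroDivisionError; on build_stage_to_host_rank_topology(2, 3, 'v'): A raises ValueError, B raises ValueError
import Mathlib
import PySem

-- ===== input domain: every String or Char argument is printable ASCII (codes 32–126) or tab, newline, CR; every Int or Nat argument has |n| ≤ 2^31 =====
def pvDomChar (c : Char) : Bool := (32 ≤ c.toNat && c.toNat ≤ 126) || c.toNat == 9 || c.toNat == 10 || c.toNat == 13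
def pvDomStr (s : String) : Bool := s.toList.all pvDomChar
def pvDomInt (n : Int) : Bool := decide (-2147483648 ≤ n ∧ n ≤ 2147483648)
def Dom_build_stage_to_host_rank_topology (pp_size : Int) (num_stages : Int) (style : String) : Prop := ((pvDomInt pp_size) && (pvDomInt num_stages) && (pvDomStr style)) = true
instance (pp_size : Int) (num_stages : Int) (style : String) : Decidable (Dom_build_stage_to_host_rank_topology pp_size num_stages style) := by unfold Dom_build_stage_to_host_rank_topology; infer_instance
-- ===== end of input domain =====

-- B replaces A's stage-by-stage up/down rank accumulator with a block construction (one rank row per block, reversed on odd blocks, then enumerated); alternative decomposition, same cost.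


-- ===== PORT A =====
def build_stage_to_host_rank_topology (pp_size : Int) (num_stages : Int) (style : String) : List (Int × Int) :=
  if style = "loop" then
    ((PySem.List.pyRange 0 num_stages 1).foldl
      (fun (d : PySem.Dict Int Int) stage_index =>
        d.insert stage_index (PySem.Int.mod stage_index pp_size)) PySem.Dict.empty).items
  else if style = "v" then
    if PySem.Int.mod num_stages pp_size ≠ 0 then
      []  -- Python raises ValueError here; excluded by Pre_
    else
      (((PySem.List.pyRange 0 num_stages 1).foldl
          (fun (st : PySem.Dict Int Int × Int) stage_index =>
            let result := st.1.insert stage_index st.2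
            if PySem.Int.mod (stage_index + 1) pp_size == 0 then (result, st.2)
            else if PySem.Int.mod (PySem.Int.floordiv stage_index pp_size) 2 == 0 then
              (result, st.2 + 1)
            else (result, st.2 - 1))
          (PySem.Dict.empty, 0)).1).items
  else []  -- Python raises ValueError here; excluded by Pre_

-- ===== PORT B =====
def build_stage_to_host_rank_topology_alt (pp_size : Int) (num_stages : Int) (style : String) : List (Int × Int) :=
  if style = "loop" then
    (PySem.Dict.ofList
      ((PySem.List.pyRange 0 num_stages 1).foldl
        (fun (pairs : List (Int × Int)) s => pairs ++ [(s, PySem.Int.mod s pp_size)]) [])).items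
  else if style = "v" then
    if PySem.Int.mod num_stages pp_size ≠ 0 then
      []  -- Python raises ValueError here; excluded by Pre_
    else
      let up := PySem.List.pyRange 0 pp_size 1
      let down := (PySem.List.slice? up none none (-1)).getD []
      let ranks := (PySem.List.pyRange 0 (PySem.Int.floordiv num_stages pp_size) 1).foldl
        (fun (acc : List Int) block => acc ++ (if PySem.Int.mod block 2 == 0 then up else down)) []
      (PySem.Dict.ofList (PySem.List.enumerate ranks)).items
  else []  -- Python raises ValueError here; excluded by Pre_

-- ===== PRECONDITION & SPEC =====
-- Pre_ excludes the inputs on which A raises (pp_size = 0 with stages to place, an indivisible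
-- v configuration, an unknown style) and, beyond that, v-style with NEGATIVE pp_size — there A
-- still returns, but its up/down accumulator walk is misaligned with Python's negative floor
-- division and yields ranks that are an accident of the implementation; B returns the empty mapping there.
def Pre_build_stage_to_host_rank_topology (pp_size : Int) (num_stages : Int) (style : String) : Prop :=
  (style = "loop" ∧ (pp_size ≠ 0 ∨ num_stages ≤ 0)) ∨
  (style = "v" ∧ 0 < pp_size ∧ pp_size ∣ num_stages)
instance (pp_size : Int) (num_stages : Int) (style : String) : Decidable (Pre_build_stage_to_host_rank_topology pp_size num_stages style) := by unfold Pre_build_stage_to_host_rank_topology; infer_instance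

def pvWitness_build_stage_to_host_rank_topology : Int × Int × String := (2, 4, "v")

def Spec_build_stage_to_host_rank_topology (pp_size : Int) (num_stages : Int) (style : String) (out : List (Int × Int)) : Prop := out = build_stage_to_host_rank_topology_alt pp_size num_stages style
instance (pp_size : Int) (num_stages : Int) (style : String) (out : List (Int × Int)) : Decidable (Spec_build_stage_to_host_rank_topology pp_size num_stages style out) := by unfold Spec_build_stage_to_host_rank_topology; infer_instance

-- ===== CLAIM (what is proved, stated in full; the proofs are below) =====
def Claim_equal_build_stage_to_host_rank_topology : Prop := ∀ (pp_size : Int) (num_stages : Int) (style : String), Dom_build_stage_to_host_rank_topology pp_size num_stages style → Pre_build_stage_to_host_rank_topology pp_size num_stages style → Spec_build_stage_to_host_rank_topology pp_size num_stages style (build_stage_to_host_rank_topology pp_size num_stages style)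

-- ===== LEMMAS AND PROOFS =====

-- The closed-form per-stage rank both sides realise for the v style.
def pvVRank (pp s : Int) : Int :=
  if PySem.Int.mod (PySem.Int.floordiv s pp) 2 == 0 then PySem.Int.mod s pp
  else pp - 1 - PySem.Int.mod s pp

theorem pvVRank_zero (pp : Int) (hpp : 0 < pp) : pvVRank pp 0 = 0 := by
  simp [pvVRank, PySem.Int.floordiv_eq_ediv_of_pos hpp, PySem.Int.mod]

-- A's rank update sends the closed form at k to the closed form at k+1.
theorem pvVRank_step (pp k : Int) (hpp : 0 < pp) (_hk : 0 ≤ k) :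
    (if PySem.Int.mod (k + 1) pp == 0 then pvVRank pp k
     else if PySem.Int.mod (PySem.Int.floordiv k pp) 2 == 0 then pvVRank pp k + 1
     else pvVRank pp k - 1) = pvVRank pp (k + 1) := by
  have hppne : pp ≠ 0 := ne_of_gt hpp
  simp only [pvVRank, PySem.Int.mod_eq_emod_of_pos hpp,
    PySem.Int.floordiv_eq_ediv_of_pos hpp,
    PySem.Int.mod_eq_emod_of_pos (by norm_num : (0:Int) < 2), beq_iff_eq]
  have ho1 : 0 ≤ k % pp := Int.emod_nonneg k hppne
  have ho2 : k % pp < pp := Int.emod_lt_of_pos k hpp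
  have hk1 : k + 1 = (k % pp + 1) + pp * (k / pp) := by
    have h := Int.mul_ediv_add_emod k pp; linarith
  have hmod : (k + 1) % pp = (k % pp + 1) % pp := by
    rw [hk1, Int.add_mul_emod_self_left]
  have hdiv : (k + 1) / pp = (k % pp + 1) / pp + k / pp := by
    rw [hk1, Int.add_mul_ediv_left _ _ hppne]
  rcases lt_or_eq_of_le (by omega : k % pp + 1 ≤ pp) with hcase | hcase
  · have h1 : (k % pp + 1) % pp = k % pp + 1 := Int.emod_eq_of_lt (by omega) hcase
    have h2 : (k % pp + 1) / pp = 0 := Int.ediv_eq_zero_of_lt (by omega) hcase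
    rw [hmod, hdiv, h1, h2, zero_add]
    generalize k % pp = o at *
    generalize k / pp = b at *
    split_ifs <;> omega
  · have h1 : (k % pp + 1) % pp = 0 := by rw [hcase]; exact Int.emod_self
    have h2 : (k % pp + 1) / pp = 1 := by rw [hcase]; exact Int.ediv_self hppne
    rw [hmod, hdiv, h1, h2]
    generalize k % pp = o at *
    generalize k / pp = b at *
    split_ifs <;> omega

-- A's stateful fold, started with the closed-form rank at k, inserts exactly the closed-form ranks.
theorem pvVFold (pp : Int) (hpp : 0 < pp) :
    ∀ (fuel : Nat) (n k : Int) (d : PySem.Dict Int Int), 0 ≤ k → (n - k).toNat = fuel →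
      (PySem.List.pyRange k n 1).foldl
        (fun (st : PySem.Dict Int Int × Int) stage_index =>
          let result := st.1.insert stage_index st.2
          if PySem.Int.mod (stage_index + 1) pp == 0 then (result, st.2)
          else if PySem.Int.mod (PySem.Int.floordiv stage_index pp) 2 == 0 then
            (result, st.2 + 1)
          else (result, st.2 - 1)) (d, pvVRank pp k)
      = ((PySem.List.pyRange k n 1).foldl
          (fun (d : PySem.Dict Int Int) s => d.insert s (pvVRank pp s)) d,
         pvVRank pp (max k n)) := by
  intro fuel
  induction fuel with
  | zero =>
    intro n k d hk hfuel
    have hnk : n ≤ k := by omega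
    rw [PySem.List.pyRange_one_eq_nil hnk, max_eq_left hnk]
    simp [List.foldl]
  | succ m ih =>
    intro n k d hk hfuel
    by_cases hkn : k < n
    · rw [PySem.List.pyRange_one_cons hkn]
      simp only [List.foldl_cons]
      have hrw : (if PySem.Int.mod (k + 1) pp == 0 then ((d.insert k (pvVRank pp k)), pvVRank pp k)
          else if PySem.Int.mod (PySem.Int.floordiv k pp) 2 == 0 then
            ((d.insert k (pvVRank pp k)), pvVRank pp k + 1)
          else ((d.insert k (pvVRank pp k)), pvVRank pp k - 1))
          = ((d.insert k (pvVRank pp k)), pvVRank pp (k + 1)) := by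
        rw [← pvVRank_step pp k hpp hk]; split_ifs <;> rfl
      have hmax : max (k + 1) n = max k n := by omega
      rw [hrw, ih n (k + 1) (d.insert k (pvVRank pp k)) (by omega) (by omega), hmax]
    · have hnk : n ≤ k := by omega
      rw [PySem.List.pyRange_one_eq_nil hnk, max_eq_left hnk]
      simp [List.foldl]

-- A dict built by inserting distinct fresh keys has exactly those pairs as items.
theorem pvItemsOfList (pairs : List (Int × Int)) (hnd : (pairs.map Prod.fst).Nodup) :
    (PySem.Dict.ofList pairs).items = pairs := by
  have h := PySem.Dict.items_foldl_insert_fresh pairs Prod.fst Prod.snd PySem.Dict.empty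
    (fun a _ => PySem.Dict.contains_empty _) hnd
  simpa using h

-- l.flatMap (fun s => [f s]) is l.map f.
theorem pvFlatMapSingleton {α β : Type} (l : List α) (f : α → β) :
    l.flatMap (fun s => [f s]) = l.map f := by
  induction l with
  | nil => rfl
  | cons a t ih => simp [List.flatMap_cons, ih]

-- One v block, read through the closed form: ascending for even blocks, descending for odd.
theorem pvVBlock (pp b : Int) (hpp : 0 < pp) (_hb : 0 ≤ b) :
    (PySem.List.pyRange (b * pp) (b * pp + pp) 1).map (pvVRank pp)
      = if PySem.Int.mod b 2 == 0 then PySem.List.pyRange 0 pp 1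
        else (PySem.List.pyRange 0 pp 1).reverse := by
  have hppne : pp ≠ 0 := ne_of_gt hpp
  have hval : ∀ k : Nat, (k : Int) < pp → pvVRank pp (b * pp + k)
      = if b % 2 = 0 then (k : Int) else pp - 1 - k := by
    intro k hk
    have hk0 : (0:Int) ≤ (k:Int) := by positivity
    have hdiv : (b * pp + (k:Int)) / pp = b := by
      rw [add_comm, Int.add_mul_ediv_right _ _ hppne, Int.ediv_eq_zero_of_lt hk0 hk, zero_add]
    have hmod : (b * pp + (k:Int)) % pp = k := by
      rw [add_comm, mul_comm, Int.add_mul_emod_self_left, Int.emod_eq_of_lt hk0 hk]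
    simp only [pvVRank, PySem.Int.floordiv_eq_ediv_of_pos hpp,
      PySem.Int.mod_eq_emod_of_pos hpp, PySem.Int.mod_eq_emod_of_pos (by norm_num : (0:Int) < 2),
      hdiv, hmod, beq_iff_eq]
  have hb2 : PySem.Int.mod b 2 = b % 2 := PySem.Int.mod_eq_emod_of_pos (by norm_num)
  rw [PySem.List.pyRange_one (b*pp) (b*pp+pp), PySem.List.pyRange_one 0 pp]
  have hlen : (b * pp + pp - b * pp).toNat = (pp - 0).toNat := by omega
  rw [hlen, List.map_map]
  split_ifs with hbeq
  · have hbeq' : b % 2 = 0 := by rwa [hb2, beq_iff_eq] at hbeq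
    apply List.map_congr_left
    intro k hk
    have hk' : (k : Int) < pp := by
      have := List.mem_range.mp hk; omega
    simp [Function.comp_apply, hval k hk', hbeq']
  · have hbeq' : ¬ b % 2 = 0 := by rwa [hb2, beq_iff_eq] at hbeq
    apply List.ext_getElem
    · simp
    · intro i h1 h2
      have hi : i < (pp - 0).toNat := by simpa using h1
      have hi' : ((pp - 0).toNat - 1 - i : Int) < pp := by omega
      have hi'' : (((pp - 0).toNat - 1 - i : Nat) : Int) < pp := by omega
      simp only [List.getElem_map, Function.comp_apply, List.getElem_reverse, List.length_map,
        List.length_range, List.getElem_range]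
      rw [hval i (by omega), if_neg hbeq']
      omega

-- The concatenated block rows are exactly the closed-form ranks of all stages.
theorem pvVRanks (pp : Int) (hpp : 0 < pp) (nb : Nat) :
    (PySem.List.pyRange 0 (nb : Int) 1).flatMap
        (fun block => if PySem.Int.mod block 2 == 0 then PySem.List.pyRange 0 pp 1
                      else (PySem.List.pyRange 0 pp 1).reverse)
      = (PySem.List.pyRange 0 ((nb : Int) * pp) 1).map (pvVRank pp) := by
  induction nb with
  | zero =>
    rw [Nat.cast_zero, zero_mul, PySem.List.pyRange_one_eq_nil le_rfl]
    rfl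
  | succ m ih =>
    have h1 : ((m + 1 : Nat) : Int) = (m : Int) + 1 := by push_cast; ring
    rw [h1, PySem.List.pyRange_one_succ_right (Int.natCast_nonneg m), List.flatMap_append, ih]
    have h2 : ((m:Int) + 1) * pp = (m:Int) * pp + pp := by ring
    rw [h2, PySem.List.pyRange_one_append 0 ((m:Int) * pp) ((m:Int)*pp + pp) (mul_nonneg (Int.natCast_nonneg m) (le_of_lt hpp)) (by linarith),
      List.map_append]
    simp only [List.flatMap_cons, List.flatMap_nil, List.append_nil]
    rw [pvVBlock pp (m:Int) hpp (Int.natCast_nonneg m)]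

-- First components of the canonical pair list are the (distinct) stages.
theorem pvNodupFst (n : Int) (f : Int → Int) :
    (((PySem.List.pyRange 0 n 1).map (fun s => (s, f s))).map Prod.fst).Nodup := by
  rw [List.map_map]
  have : (Prod.fst ∘ fun s => (s, f s)) = (fun s : Int => s) := rfl
  rw [this, List.map_id_fun']
  exact PySem.List.nodup_pyRange_one 0 n

-- ===== VERDICT (by name: the statement is the Claim_ definition above) =====
theorem build_stage_to_host_rank_topology_spec : Claim_equal_build_stage_to_host_rank_topology := by
  intro pp_size num_stages style _hdom hpre
  unfold Spec_build_stage_to_host_rank_topology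
  unfold build_stage_to_host_rank_topology build_stage_to_host_rank_topology_alt
  rcases hpre with ⟨hst, _⟩ | ⟨hst, hpp, hdvd⟩
  · rw [hst]
    rw [PySem.List.foldl_append_eq_flatMap, List.nil_append,
      pvFlatMapSingleton (PySem.List.pyRange 0 num_stages 1) (fun s => (s, PySem.Int.mod s pp_size)),
      pvItemsOfList _ (pvNodupFst num_stages (fun s => PySem.Int.mod s pp_size))]
    have h := PySem.Dict.items_foldl_insert_fresh (PySem.List.pyRange 0 num_stages 1)
      (fun s => s) (fun s => PySem.Int.mod s pp_size) PySem.Dict.empty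
      (fun a _ => PySem.Dict.contains_empty _) (by simpa using PySem.List.nodup_pyRange_one 0 num_stages)
    simpa using h
  · rw [hst]
    have hppne : pp_size ≠ 0 := ne_of_gt hpp
    have hmodz : PySem.Int.mod num_stages pp_size = 0 :=
      (PySem.Int.mod_eq_zero_iff_dvd _ _).mpr hdvd
    rw [if_neg (by decide : ¬ ("v" : String) = "loop"), if_pos rfl, if_neg (by simp [hmodz]),
        if_neg (by decide : ¬ ("v" : String) = "loop"), if_pos rfl, if_neg (by simp [hmodz])]
    -- A side: the stateful fold inserts the closed-form ranks
    have hfoldA := pvVFold pp_size hpp (num_stages - 0).toNat num_stages 0 PySem.Dict.empty le_rfl rfl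
    rw [pvVRank_zero pp_size hpp] at hfoldA
    rw [hfoldA]
    have hA := PySem.Dict.items_foldl_insert_fresh (PySem.List.pyRange 0 num_stages 1)
      (fun s => s) (fun s => pvVRank pp_size s) PySem.Dict.empty
      (fun a _ => PySem.Dict.contains_empty _) (by simpa using PySem.List.nodup_pyRange_one 0 num_stages)
    have hA' : ((PySem.List.pyRange 0 num_stages 1).foldl
        (fun (d : PySem.Dict Int Int) s => d.insert s (pvVRank pp_size s)) PySem.Dict.empty).items
        = (PySem.List.pyRange 0 num_stages 1).map (fun s => (s, pvVRank pp_size s)) := by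
      simpa using hA
    rw [hA']
    dsimp only
    -- B side: the block rows concatenate to the closed-form ranks
    obtain ⟨t, ht⟩ := hdvd
    have hfd : PySem.Int.floordiv num_stages pp_size = t := by
      rw [PySem.Int.floordiv_eq_ediv_of_pos hpp, ht, Int.mul_ediv_cancel_left t hppne]
    rw [hfd, PySem.List.slice?_none_none_neg_one, Option.getD_some,
      PySem.List.foldl_append_eq_flatMap, List.nil_append]
    by_cases htpos : 0 < t
    · have htn : ((t.toNat : Int)) = t := by omega
      have hranks := pvVRanks pp_size hpp t.toNat
      rw [htn] at hranks
      have htp : t * pp_size = num_stages := by rw [ht]; ring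
      rw [htp] at hranks
      rw [hranks]
      -- enumerate of the rank list
      rw [PySem.List.enumerate_eq_map_pyRange _ 0]
      have hlen : PySem.List.len ((PySem.List.pyRange 0 num_stages 1).map (pvVRank pp_size))
          = num_stages := by
        have hn0 : 0 ≤ num_stages := by nlinarith [ht]
        simp [PySem.List.len, PySem.List.length_pyRange_one]
        omega
      rw [hlen]
      have henum : (PySem.List.pyRange 0 num_stages 1).map
            (fun j => (j, PySem.List.pyGetD ((PySem.List.pyRange 0 num_stages 1).map (pvVRank pp_size)) j 0))
          = (PySem.List.pyRange 0 num_stages 1).map (fun j => (j, pvVRank pp_size j)) := by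
        apply List.map_congr_left
        intro j hj
        obtain ⟨hj1, hj2⟩ := PySem.List.mem_pyRange_one.mp hj
        rw [PySem.List.pyGetD_map_pyRange_of_nonneg (pvVRank pp_size) num_stages j 0 hj1 hj2]
      rw [henum, pvItemsOfList _ (pvNodupFst num_stages (pvVRank pp_size))]
    · have htn : num_stages ≤ 0 := by nlinarith [ht]
      rw [PySem.List.pyRange_one_eq_nil (by omega : t ≤ 0), PySem.List.pyRange_one_eq_nil htn]
      rfl
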